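-- pv_equiv track=rewrite | github.com/static-analysis-engineering/CodeHawk-C | chc/reporting/ProofObligations.py | get_totals_from_tagtotals
-- ===== SOURCE A (Python) =====
-- from typing import (
--     Any, Callable, cast, Dict, List, Sequence, Set, Tuple, TYPE_CHECKING)
--
-- dischargemethods: List[str] = [
--     "stmt", "local", "api", "contract", "open", "violated"]
--
-- def get_dsmethods(extra: List[str]) -> List[str]:
--     return extra + dischargemethods
--
-- def get_totals_from_tagtotals(
--         tagtotals: Dict[str, Dict[str, int]]) -> Dict[str, int]:
--     totals: Dict[str, int] = {}
--     dsmethods = get_dsmethods([])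
--     for dm in dsmethods:
--         totals[dm] = sum(
--             [tagtotals[t][dm] for t in tagtotals if dm in tagtotals[t]])
--     return totals
-- ===== SOURCE B (Python) =====
-- from typing import Dict, List
--
-- dischargemethods: List[str] = [
--     "stmt", "local", "api", "contract", "open", "violated"]
--
-- def get_dsmethods(extra: List[str]) -> List[str]:
--     return extra + dischargemethods
--
-- def get_totals_from_tagtotals(
--         tagtotals: Dict[str, Dict[str, int]]) -> Dict[str, int]:
--     # one accumulating pass over the tags instead of one full scan per method
--     acc: Dict[str, int] = {}
--     for inner in tagtotals.values():
--         for dm, v in inner.items():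
--             acc[dm] = acc.get(dm, 0) + v
--     return {dm: acc.get(dm, 0) for dm in get_dsmethods([])}
-- ===== Notes on version B (the rewrite author's own statement) =====
-- stated objective: alternative
-- what changed: Instead of one full scan of all tags (building and summing a list) per discharge method, B makes a single accumulating pass over the tags into one dict of per-method sums and then projects the six discharge methods from it.
import Mathlib
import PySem

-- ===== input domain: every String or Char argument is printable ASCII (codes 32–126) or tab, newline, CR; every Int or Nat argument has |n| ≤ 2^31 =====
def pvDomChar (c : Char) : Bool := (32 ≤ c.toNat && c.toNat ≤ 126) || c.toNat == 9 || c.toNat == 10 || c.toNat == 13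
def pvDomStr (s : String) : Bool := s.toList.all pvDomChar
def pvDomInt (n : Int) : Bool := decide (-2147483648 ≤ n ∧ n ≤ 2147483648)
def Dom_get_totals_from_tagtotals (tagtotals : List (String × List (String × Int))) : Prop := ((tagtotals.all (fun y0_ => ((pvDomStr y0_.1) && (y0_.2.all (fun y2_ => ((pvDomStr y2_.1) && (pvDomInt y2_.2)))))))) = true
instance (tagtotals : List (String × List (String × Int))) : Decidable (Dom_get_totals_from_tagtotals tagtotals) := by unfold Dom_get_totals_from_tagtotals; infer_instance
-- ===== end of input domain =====

-- ===== PORT A =====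
-- B changes the decomposition: one accumulating pass over the tags instead of one
-- full scan of all tags per discharge method (objective: alternative decomposition).
def pvDischargemethods : List String :=
  ["stmt", "local", "api", "contract", "open", "violated"]

def get_dsmethods (extra : List String) : List String :=
  extra ++ pvDischargemethods

def get_totals_from_tagtotals (tagtotals : List (String × List (String × Int))) : List (String × Int) :=
  let dsmethods := get_dsmethods []
  let totals : PySem.Dict String Int :=
    dsmethods.foldl
      (fun totals dm =>
        totals.insert dm
          (((tagtotals.map Prod.fst).filterMap
              (fun t => (PySem.Dict.mk ((PySem.Dict.mk tagtotals).getD t [])).get? dm)).sum))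
      PySem.Dict.empty
  totals.items

-- ===== PORT B =====
def get_totals_from_tagtotals_alt (tagtotals : List (String × List (String × Int))) : List (String × Int) :=
  let acc : PySem.Dict String Int :=
    tagtotals.foldl
      (fun acc p =>
        p.2.foldl (fun acc q => acc.modify q.1 0 (fun x => x + q.2)) acc)
      PySem.Dict.empty
  ((get_dsmethods []).foldl
      (fun (d : PySem.Dict String Int) dm => d.insert dm (acc.getD dm 0))
      PySem.Dict.empty).items

-- ===== PRECONDITION & SPEC =====
-- Pre_ excludes association lists with duplicate outer or duplicate inner keys: those do
-- not represent any Python dict (the Python argument type), so neither behaviour is specified there.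
def Pre_get_totals_from_tagtotals (tagtotals : List (String × List (String × Int))) : Prop :=
  (tagtotals.map Prod.fst).Nodup ∧ ∀ p ∈ tagtotals, (p.2.map Prod.fst).Nodup
instance (tagtotals : List (String × List (String × Int))) : Decidable (Pre_get_totals_from_tagtotals tagtotals) := by
  unfold Pre_get_totals_from_tagtotals; infer_instance

def pvWitness_get_totals_from_tagtotals : (List (String × List (String × Int))) :=
  [("tag1", [("stmt", 2), ("open", 3)]), ("tag2", [("stmt", 4), ("other", 7)])]

def Spec_get_totals_from_tagtotals (tagtotals : List (String × List (String × Int))) (out : List (String × Int)) : Prop := out = get_totals_from_tagtotals_alt tagtotals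
instance (tagtotals : List (String × List (String × Int))) (out : List (String × Int)) : Decidable (Spec_get_totals_from_tagtotals tagtotals out) := by unfold Spec_get_totals_from_tagtotals; infer_instance

-- ===== CLAIM (what is proved, stated in full; the proofs are below) =====
def Claim_equal_get_totals_from_tagtotals : Prop := ∀ (tagtotals : List (String × List (String × Int))), Dom_get_totals_from_tagtotals tagtotals → Pre_get_totals_from_tagtotals tagtotals → Spec_get_totals_from_tagtotals tagtotals (get_totals_from_tagtotals tagtotals)

-- ===== LEMMAS AND PROOFS =====

-- With nodup outer keys, iterating over the keys and looking each one up is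
-- the same as iterating over the entries.
theorem pv_filterMap_keys_lookup (g : List (String × Int) → Option Int)
    (l : List (String × List (String × Int))) (h : (l.map Prod.fst).Nodup) :
    (l.map Prod.fst).filterMap (fun t => g ((PySem.Dict.mk l).getD t [])) =
      l.filterMap (fun p => g p.2) := by
  induction l with
  | nil => rfl
  | cons hd tl ih =>
    obtain ⟨k, v⟩ := hd
    simp only [List.map_cons, List.nodup_cons] at h
    simp only [List.map_cons, List.filterMap_cons]
    have h1 : (PySem.Dict.mk ((k, v) :: tl)).getD k [] = v := by
      simp [PySem.Dict.getD_eq_get?_getD, PySem.Dict.get?_mk_cons]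
    have h2 : (tl.map Prod.fst).filterMap (fun t => g ((PySem.Dict.mk ((k, v) :: tl)).getD t [])) =
        (tl.map Prod.fst).filterMap (fun t => g ((PySem.Dict.mk tl).getD t [])) := by
      apply List.filterMap_congr
      intro t ht
      have hne : k ≠ t := by
        intro hEq; exact h.1 (hEq ▸ ht)
      simp [PySem.Dict.getD_eq_get?_getD, PySem.Dict.get?_mk_cons,
        beq_eq_false_iff_ne.mpr hne]
    rw [h1, h2, ih h.2]

-- The inner accumulation loop adds, at key dm, the sum of inner values with key dm.
theorem pv_inner_loop (dm : String) (inner : List (String × Int)) (a : PySem.Dict String Int) :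
    (inner.foldl (fun acc q => acc.modify q.1 0 (fun x => x + q.2)) a).getD dm 0 =
      a.getD dm 0 + ((inner.filter (fun q => q.1 == dm)).map Prod.snd).sum := by
  induction inner generalizing a with
  | nil => simp
  | cons hd tl ih =>
    simp only [List.foldl_cons, List.filter_cons]
    rw [ih]
    by_cases hEq : hd.1 = dm
    · subst hEq
      simp [PySem.Dict.getD_modify_self]
      ring
    · rw [PySem.Dict.getD_modify_of_ne _ _ _ (Ne.symm hEq)]
      simp [beq_eq_false_iff_ne.mpr hEq]

-- The whole accumulator yields, at key dm, the sum over all tags of the per-tag filtered sums.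
theorem pv_acc_loop (dm : String) (l : List (String × List (String × Int)))
    (a : PySem.Dict String Int) :
    (l.foldl (fun acc p => p.2.foldl (fun acc q => acc.modify q.1 0 (fun x => x + q.2)) acc) a).getD dm 0 =
      a.getD dm 0 + (l.map (fun p => ((p.2.filter (fun q => q.1 == dm)).map Prod.snd).sum)).sum := by
  induction l generalizing a with
  | nil => simp
  | cons hd tl ih =>
    rw [List.foldl_cons, ih, pv_inner_loop]
    simp only [List.map_cons, List.sum_cons]
    ring

-- With nodup inner keys, the filtered sum at dm is the (defaulted) first-match lookup.
theorem pv_filter_sum_eq_lookup (dm : String) (inner : List (String × Int))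
    (h : (inner.map Prod.fst).Nodup) :
    ((inner.filter (fun q => q.1 == dm)).map Prod.snd).sum =
      ((PySem.Dict.mk inner).get? dm).getD 0 := by
  induction inner with
  | nil => rfl
  | cons hd tl ih =>
    simp only [List.map_cons, List.nodup_cons] at h
    rw [List.filter_cons, PySem.Dict.get?_mk_cons]
    by_cases hEq : hd.1 = dm
    · have hb : (hd.1 == dm) = true := beq_iff_eq.mpr hEq
      have hnotin : ∀ q ∈ tl, ¬ (q.1 == dm) = true := by
        intro q hq hqb
        exact h.1 (by rw [hEq, ← beq_iff_eq.mp hqb]; exact List.mem_map_of_mem hq)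
      simp [hb, List.filter_eq_nil_iff.mpr hnotin]
    · have hb : (hd.1 == dm) = false := beq_eq_false_iff_ne.mpr hEq
      simp [hb, ih h.2]

theorem pv_pointwise (tagtotals : List (String × List (String × Int)))
    (hpre : Pre_get_totals_from_tagtotals tagtotals) (dm : String) :
    ((tagtotals.map Prod.fst).filterMap
        (fun t => (PySem.Dict.mk ((PySem.Dict.mk tagtotals).getD t [])).get? dm)).sum =
      (tagtotals.foldl
          (fun acc p => p.2.foldl (fun acc q => acc.modify q.1 0 (fun x => x + q.2)) acc)
          PySem.Dict.empty).getD dm 0 := by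
  obtain ⟨h1, h2⟩ := hpre
  rw [pv_acc_loop,
    pv_filterMap_keys_lookup (fun xs => (PySem.Dict.mk xs).get? dm) tagtotals h1]
  simp only [PySem.Dict.getD_empty, zero_add]
  induction tagtotals with
  | nil => rfl
  | cons hd tl ih =>
    simp only [List.map_cons] at h1
    simp only [List.filterMap_cons, List.map_cons, List.sum_cons]
    rw [← ih h1.of_cons (fun p hp => h2 p (List.mem_cons_of_mem _ hp)),
      pv_filter_sum_eq_lookup dm hd.2 (h2 hd (List.mem_cons_self ..))]
    cases (PySem.Dict.mk hd.2).get? dm <;> simp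

-- ===== VERDICT (by name: the statement is the Claim_ definition above) =====
theorem get_totals_from_tagtotals_spec : Claim_equal_get_totals_from_tagtotals := by
  intro tagtotals _ hpre
  unfold Spec_get_totals_from_tagtotals get_totals_from_tagtotals get_totals_from_tagtotals_alt
  simp only []
  congr 1
  apply PySem.List.foldl_congr_mem
  intro d dm _hm
  rw [pv_pointwise tagtotals hpre dm]
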